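-- pv_equiv track=rewrite | github.com/jjob-spec/ingestkit | packages/ingestkit-excel/src/ingestkit_excel/processors/splitter.py | _detect_blank_row_boundaries
-- ===== SOURCE A (Python) =====
-- _BLANK_ROW_THRESHOLD = 2
--
-- def _detect_blank_row_boundaries(all_rows: list[list]) -> list[int]:
--     """Find positions where >= _BLANK_ROW_THRESHOLD consecutive blank rows occur.
--
--     Returns the row index AFTER the blank gap (i.e. where the next region starts).
--     """
--     boundaries: list[int] = []
--     consecutive_blank = 0
--     gap_start = -1
--
--     for idx, row in enumerate(all_rows):
--         is_blank = all(v is None or str(v).strip() == "" for v in row)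
--         if is_blank:
--             if consecutive_blank == 0:
--                 gap_start = idx
--             consecutive_blank += 1
--         else:
--             if consecutive_blank >= _BLANK_ROW_THRESHOLD:
--                 boundaries.append(gap_start)
--             consecutive_blank = 0
--
--     # Handle trailing blank rows
--     if consecutive_blank >= _BLANK_ROW_THRESHOLD:
--         boundaries.append(gap_start)
--
--     return boundaries
-- ===== SOURCE B (Python) =====
-- def _detect_blank_row_boundaries(all_rows: list[list]) -> list[int]:
--     """Mask-then-window: a boundary is the first index of a blank run of length >= 2
--     (a blank row followed by a blank row, not preceded by a blank row)."""
--     blanks = [all(v is None or str(v).strip() == "" for v in row) for row in all_rows]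
--     return [i for i, (prev, cur, nxt) in enumerate(zip([False] + blanks, blanks, blanks[1:]))
--             if cur and nxt and not prev]
-- ===== Notes on version B (the rewrite author's own statement) =====
-- stated objective: simpler
-- what changed: Replaced the consecutive-blank counter + gap_start state machine (with its trailing-run fix-up after the loop) by a precomputed blank mask and a single comprehension over a 3-wide window (prev, cur, nxt) that emits the first index of each blank run of length >= 2.
import Mathlib
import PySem

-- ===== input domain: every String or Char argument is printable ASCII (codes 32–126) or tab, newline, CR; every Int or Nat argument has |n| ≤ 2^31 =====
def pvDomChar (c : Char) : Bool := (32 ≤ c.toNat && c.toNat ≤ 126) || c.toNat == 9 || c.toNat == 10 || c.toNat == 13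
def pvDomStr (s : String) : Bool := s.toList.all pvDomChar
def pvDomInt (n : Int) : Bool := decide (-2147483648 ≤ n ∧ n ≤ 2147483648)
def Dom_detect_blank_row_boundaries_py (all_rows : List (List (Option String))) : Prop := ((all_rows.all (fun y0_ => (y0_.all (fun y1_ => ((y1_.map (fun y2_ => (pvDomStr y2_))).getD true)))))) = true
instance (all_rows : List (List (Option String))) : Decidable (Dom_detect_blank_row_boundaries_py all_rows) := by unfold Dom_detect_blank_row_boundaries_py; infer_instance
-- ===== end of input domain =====

-- B replaces A's consecutive-blank counter/gap_start state machine with a blank mask plus a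
-- three-wide window comprehension (objective: simpler; same cost).

-- ===== PORT A =====
-- shared helper: Python's `all(v is None or str(v).strip() == "" for v in row)` (identical text in A and B)
def pyIsBlankRow (row : List (Option String)) : Bool :=
  row.all (fun v => match v with
    | none => true
    | some s => PySem.Str.strip s == "")

def detect_blank_row_boundaries_py (all_rows : List (List (Option String))) : List Int :=
  let st := (PySem.List.enumerate all_rows 0).foldl
    (fun (st : List Int × Int × Int) (p : Int × List (Option String)) =>
      let boundaries := st.1
      let consecutive_blank := st.2.1
      let gap_start := st.2.2
      if pyIsBlankRow p.2 then
        (boundaries, consecutive_blank + 1, if consecutive_blank == 0 then p.1 else gap_start)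
      else
        ((if consecutive_blank ≥ 2 then boundaries ++ [gap_start] else boundaries), 0, gap_start))
    ([], 0, -1)
  if st.2.1 ≥ 2 then st.1 ++ [st.2.2] else st.1

-- ===== PORT B =====
def detect_blank_row_boundaries_py_alt (all_rows : List (List (Option String))) : List Int :=
  let blanks := all_rows.map pyIsBlankRow
  -- zip([False] + blanks, blanks, blanks[1:]); blanks[1:] = drop 1 (nonnegative slice)
  (PySem.List.enumerate (List.zip (false :: blanks) (List.zip blanks (blanks.drop 1))) 0).filterMap
    (fun p => if p.2.2.1 && p.2.2.2 && !p.2.1 then some p.1 else none)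

-- ===== PRECONDITION & SPEC =====
def Spec_detect_blank_row_boundaries_py (all_rows : List (List (Option String))) (out : List Int) : Prop := out = detect_blank_row_boundaries_py_alt all_rows
instance (all_rows : List (List (Option String))) (out : List Int) : Decidable (Spec_detect_blank_row_boundaries_py all_rows out) := by unfold Spec_detect_blank_row_boundaries_py; infer_instance

-- ===== CLAIM (what is proved, stated in full; the proofs are below) =====
def Claim_equal_detect_blank_row_boundaries_py : Prop := ∀ (all_rows : List (List (Option String))), Dom_detect_blank_row_boundaries_py all_rows → Spec_detect_blank_row_boundaries_py all_rows (detect_blank_row_boundaries_py all_rows)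

-- ===== LEMMAS AND PROOFS =====

-- A's loop, recast as structural recursion over the blank mask
def loopA : List Bool → Int → (List Int × Int × Int) → List Int
  | [], _, st => if st.2.1 ≥ 2 then st.1 ++ [st.2.2] else st.1
  | b :: rest, idx, st =>
    if b then loopA rest (idx + 1) (st.1, st.2.1 + 1, if st.2.1 == 0 then idx else st.2.2)
    else loopA rest (idx + 1) ((if st.2.1 ≥ 2 then st.1 ++ [st.2.2] else st.1), 0, st.2.2)

-- B's comprehension, recast as structural recursion carrying the previous-blank flag
def loopB : List Bool → Bool → Int → List Int
  | [], _, _ => []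
  | b :: rest, prev, i =>
    if b && rest.headD false && !prev then i :: loopB rest b (i + 1) else loopB rest b (i + 1)

theorem portA_eq_loopA (rows : List (List (Option String))) :
    ∀ (s : Int) (st : List Int × Int × Int),
      (if ((PySem.List.enumerate rows s).foldl
        (fun (st : List Int × Int × Int) (p : Int × List (Option String)) =>
          if pyIsBlankRow p.2 then
            (st.1, st.2.1 + 1, if st.2.1 == 0 then p.1 else st.2.2)
          else
            ((if st.2.1 ≥ 2 then st.1 ++ [st.2.2] else st.1), 0, st.2.2)) st).2.1 ≥ 2
       then ((PySem.List.enumerate rows s).foldl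
        (fun (st : List Int × Int × Int) (p : Int × List (Option String)) =>
          if pyIsBlankRow p.2 then
            (st.1, st.2.1 + 1, if st.2.1 == 0 then p.1 else st.2.2)
          else
            ((if st.2.1 ≥ 2 then st.1 ++ [st.2.2] else st.1), 0, st.2.2)) st).1 ++
            [((PySem.List.enumerate rows s).foldl
        (fun (st : List Int × Int × Int) (p : Int × List (Option String)) =>
          if pyIsBlankRow p.2 then
            (st.1, st.2.1 + 1, if st.2.1 == 0 then p.1 else st.2.2)
          else
            ((if st.2.1 ≥ 2 then st.1 ++ [st.2.2] else st.1), 0, st.2.2)) st).2.2]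
       else ((PySem.List.enumerate rows s).foldl
        (fun (st : List Int × Int × Int) (p : Int × List (Option String)) =>
          if pyIsBlankRow p.2 then
            (st.1, st.2.1 + 1, if st.2.1 == 0 then p.1 else st.2.2)
          else
            ((if st.2.1 ≥ 2 then st.1 ++ [st.2.2] else st.1), 0, st.2.2)) st).1)
      = loopA (rows.map pyIsBlankRow) s st := by
  induction rows with
  | nil => intro s st; simp [PySem.List.enumerate_nil, loopA]
  | cons r rows ih =>
    intro s st
    simp only [PySem.List.enumerate_cons, List.foldl_cons, List.map_cons, loopA]
    by_cases h : pyIsBlankRow r = true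
    · simp only [h, if_true, ih]
    · simp only [Bool.not_eq_true] at h
      simp only [h, Bool.false_eq_true, if_false, ih]

theorem portB_eq_loopB (blanks : List Bool) :
    ∀ (prev : Bool) (s : Int),
      (PySem.List.enumerate (List.zip (prev :: blanks) (List.zip blanks (blanks.drop 1))) s).filterMap
        (fun p => if p.2.2.1 && p.2.2.2 && !p.2.1 then some p.1 else none)
      = loopB blanks prev s := by
  induction blanks with
  | nil => intro prev s; simp [PySem.List.enumerate_nil, loopB]
  | cons b rest ih =>
    intro prev s
    cases rest with
    | nil => simp [loopB, PySem.List.enumerate_nil]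
    | cons r rs =>
      simp only [List.drop_succ_cons, List.drop_zero, List.zip_cons_cons,
        PySem.List.enumerate_cons, List.filterMap_cons, loopB]
      have ih' := ih b (s + 1)
      simp only [List.drop_succ_cons, List.drop_zero] at ih'
      by_cases h : (b && r && !prev) = true
      · simp only [List.headD_cons, h, if_true, ih']
        rfl
      · simp only [Bool.not_eq_true] at h
        simp only [List.headD_cons, h, Bool.false_eq_true, if_false, ih']
        rfl

theorem loopA_eq_loopB (bs : List Bool) :
    ∀ (idx : Int) (acc : List Int) (cb : Int) (gs : Int), 0 ≤ cb →
      loopA bs idx (acc, cb, gs)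
        = acc ++ (if cb ≥ 2 ∨ (cb = 1 ∧ bs.headD false = true) then [gs] else [])
              ++ loopB bs (decide (1 ≤ cb)) idx := by
  induction bs with
  | nil =>
    intro idx acc cb gs hcb
    simp only [loopA, loopB, List.headD_nil]
    split_ifs with h1 h2 h2 <;> simp_all <;> try omega
  | cons b rest ih =>
    intro idx acc cb gs hcb
    cases hb : b with
    | true =>
      simp only [loopA]
      by_cases h0 : cb = 0
      · subst h0
        simp only [beq_self_eq_true, if_true, show (0:Int) + 1 = 1 from rfl]
        rw [ih (idx + 1) acc 1 idx (by omega)]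
        simp only [loopB, List.headD_cons]
        cases hr : rest.headD false with
        | true => simp
        | false => simp
      · have hbeq : (cb == 0) = false := by simp [h0]
        simp only [hbeq, Bool.false_eq_true, if_false]
        have hrec := ih (idx + 1) acc (cb + 1) gs (by omega)
        rw [hrec]
        have h1 : 1 ≤ cb := by omega
        simp only [loopB, List.headD_cons]
        have hc2 : cb + 1 ≥ 2 := by omega
        have hcc : 2 ≤ cb ∨ cb = 1 := by omega
        simp [hc2, h1, hcc, hcb]
    | false =>
      simp only [loopA, Bool.false_eq_true, if_false]
      rw [ih (idx + 1) (if cb ≥ 2 then acc ++ [gs] else acc) 0 gs (by omega)]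
      simp only [loopB, List.headD_cons, Bool.false_and]
      split_ifs with h1 h2 h2 <;> simp_all <;> try omega

-- ===== VERDICT (by name: the statement is the Claim_ definition above) =====
theorem detect_blank_row_boundaries_py_spec : Claim_equal_detect_blank_row_boundaries_py := by
  intro all_rows _
  unfold Spec_detect_blank_row_boundaries_py detect_blank_row_boundaries_py detect_blank_row_boundaries_py_alt
  rw [portB_eq_loopB]
  have hA := portA_eq_loopA all_rows 0 ([], 0, -1)
  simp only at hA
  rw [hA, loopA_eq_loopB (all_rows.map pyIsBlankRow) 0 [] 0 (-1) (by omega)]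
  simp
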